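-- pv_equiv track=rewrite | github.com/Michaelhuazhang/code_offer | 编程之法/rotate_string.py | StringContains
-- ===== SOURCE A (Python) =====
-- def StringContains(s1, s2):
-- 	if not s1 or not s2:
-- 		return False
-- 	dict_s = {}
-- 	list_1 = list(s1)
-- 	list_2 = list(s2)
-- 	for i in list_1:
-- 		if i not in dict_s:
-- 			dict_s[i] = 1
-- 	for j in list_2:
-- 		if j not in dict_s:
-- 			return False
-- 	return True
-- ===== SOURCE B (Python) =====
-- def StringContains(s1, s2):
--     if not s1 or not s2:
--         return False
--     a = sorted(s1)
--     b = sorted(s2)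
--     n = len(a)
--     i = 0
--     for c in b:
--         while i < n and a[i] < c:
--             i += 1
--         if i == n or a[i] != c:
--             return False
--     return True
-- ===== Notes on version B (the rewrite author's own statement) =====
-- stated objective: alternative
-- what changed: Replaces the dict-of-seen-chars build plus per-char hash membership loop by sorting both strings and walking one non-consuming pointer over sorted(s1) while scanning sorted(s2) (sort-and-merge membership test).
import Mathlib
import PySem

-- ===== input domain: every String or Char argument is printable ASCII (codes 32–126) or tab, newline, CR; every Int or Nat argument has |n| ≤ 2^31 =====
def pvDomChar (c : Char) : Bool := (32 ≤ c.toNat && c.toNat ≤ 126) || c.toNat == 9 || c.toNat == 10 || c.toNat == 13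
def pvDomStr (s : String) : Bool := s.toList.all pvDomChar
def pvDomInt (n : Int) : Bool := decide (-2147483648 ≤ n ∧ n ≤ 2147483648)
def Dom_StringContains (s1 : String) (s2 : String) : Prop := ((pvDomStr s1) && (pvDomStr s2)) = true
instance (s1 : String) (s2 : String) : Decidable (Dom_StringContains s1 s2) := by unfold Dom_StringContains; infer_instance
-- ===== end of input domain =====

-- B replaces A's dict build + per-char hash-membership loop by sorting both strings and
-- merging with a non-consuming pointer (alternative decomposition, similar cost).

-- ===== PORT A =====
-- for j in list_2: if j not in dict_s: return False
def scCheck (d : PySem.Dict Char Int) : List Char → Bool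
  | [] => true
  | j :: rest => if d.contains j then scCheck d rest else false

def StringContains (s1 : String) (s2 : String) : Bool :=
  if s1.toList.isEmpty || s2.toList.isEmpty then false
  else
    let dict_s := s1.toList.foldl (fun d i => if d.contains i then d else d.insert i 1)
      (PySem.Dict.empty : PySem.Dict Char Int)
    scCheck dict_s s2.toList

-- ===== PORT B =====
-- while i < n and a[i] < c: i += 1
def scAdvance (a : List Char) (n : Nat) (c : Char) (i : Nat) : Nat :=
  if i < n ∧ a.getD i default < c then scAdvance a n c (i + 1) else i
termination_by n - i
decreasing_by omega

-- for c in b: advance i; if i == n or a[i] != c: return False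
def scLoop (a : List Char) (n : Nat) : List Char → Nat → Bool
  | [], _ => true
  | c :: b, i =>
    let i' := scAdvance a n c i
    if i' = n ∨ a.getD i' default ≠ c then false else scLoop a n b i'

def StringContains_alt (s1 : String) (s2 : String) : Bool :=
  if s1.toList.isEmpty || s2.toList.isEmpty then false
  else
    let a := PySem.List.sorted s1.toList (fun x => x) false
    let b := PySem.List.sorted s2.toList (fun x => x) false
    scLoop a a.length b 0

-- ===== PRECONDITION & SPEC =====
def Spec_StringContains (s1 : String) (s2 : String) (out : Bool) : Prop := out = StringContains_alt s1 s2
instance (s1 : String) (s2 : String) (out : Bool) : Decidable (Spec_StringContains s1 s2 out) := by unfold Spec_StringContains; infer_instance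

-- ===== CLAIM (what is proved, stated in full; the proofs are below) =====
def Claim_equal_StringContains : Prop := ∀ (s1 : String) (s2 : String), Dom_StringContains s1 s2 → Spec_StringContains s1 s2 (StringContains s1 s2)

-- ===== LEMMAS AND PROOFS =====

-- A's first loop: key membership of the built dict is membership in s1's chars
theorem sc_fold_contains (l : List Char) (d : PySem.Dict Char Int) (c : Char) :
    (l.foldl (fun d i => if d.contains i then d else d.insert i 1) d).contains c
      = (d.contains c || decide (c ∈ l)) := by
  induction l generalizing d with
  | nil => simp
  | cons x xs ih =>
    simp only [List.foldl_cons, ih]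
    by_cases hx : c = x
    · subst hx
      split
      · next h => simp [h]
      · simp
    · have h2 : ∀ d' : PySem.Dict Char Int, (d'.insert x 1).contains c = d'.contains c := by
        intro d'
        rw [PySem.Dict.contains_insert]
        simp [hx]
      split <;> simp [h2, hx, List.mem_cons]

-- A's second loop is an all-membership check
theorem sc_check_eq_all (d : PySem.Dict Char Int) (l : List Char) :
    scCheck d l = l.all (fun j => d.contains j) := by
  induction l with
  | nil => rfl
  | cons x xs ih =>
    simp only [scCheck, List.all_cons]
    split <;> simp_all

-- scAdvance skips exactly the (< c)-prefix of a.drop i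
theorem sc_advance_drop (a : List Char) (c : Char) (i : Nat) (h : i ≤ a.length) :
    scAdvance a a.length c i ≤ a.length ∧
      a.drop (scAdvance a a.length c i) = (a.drop i).dropWhile (fun x => decide (x < c)) := by
  rw [scAdvance]
  split
  · next hc =>
    have hlt : i < a.length := hc.1
    have ih := sc_advance_drop a c (i + 1) hlt
    refine ⟨ih.1, ?_⟩
    rw [ih.2, List.drop_eq_getElem_cons hlt, List.dropWhile_cons_of_pos]
    have hg : a.getD i default = a[i] := List.getD_eq_getElem _ _ hlt
    rw [← hg]
    exact decide_eq_true hc.2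
  · next hc =>
    refine ⟨h, ?_⟩
    by_cases hi : i < a.length
    · have hg : a.getD i default = a[i] := List.getD_eq_getElem _ _ hi
      have hnlt : ¬ a[i] < c := by
        intro hlt; exact hc ⟨hi, by rw [hg]; exact hlt⟩
      rw [List.drop_eq_getElem_cons hi, List.dropWhile_cons_of_neg (by simpa using hnlt)]
    · have : i = a.length := by omega
      simp [this]
termination_by a.length - i
decreasing_by omega

-- proof-side list formulation of B's merge walk
def mergeChk : List Char → List Char → Bool
  | _, [] => true
  | a, c :: b =>
    match a.dropWhile (fun x => decide (x < c)) with
    | [] => false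
    | x :: xs => if x = c then mergeChk (x :: xs) b else false

theorem sc_loop_eq_mergeChk (a : List Char) (b : List Char) :
    ∀ i, i ≤ a.length → scLoop a a.length b i = mergeChk (a.drop i) b := by
  induction b with
  | nil => intro i h; rfl
  | cons c b ih =>
    intro i h
    obtain ⟨h1, h2⟩ := sc_advance_drop a c i h
    simp only [scLoop, mergeChk, ← h2]
    by_cases hn : scAdvance a a.length c i = a.length
    · simp [hn, List.drop_length]
    · have hlt : scAdvance a a.length c i < a.length := by omega
      have hg : a.getD (scAdvance a a.length c i) default = a[scAdvance a a.length c i] :=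
        List.getD_eq_getElem _ _ hlt
      rw [List.drop_eq_getElem_cons hlt]
      by_cases he : a[scAdvance a a.length c i] = c
      · rw [if_neg (by rw [hg]; simp [hn, he])]
        rw [ih _ (le_of_lt hlt), List.drop_eq_getElem_cons hlt]
        simp [he]
      · rw [if_pos (by rw [hg]; simp [he])]
        simp [he]

theorem pv_all_congr {α : Type} (l : List α) (p q : α → Bool) (h : ∀ x ∈ l, p x = q x) :
    l.all p = l.all q := by
  induction l with
  | nil => rfl
  | cons y ys ih => simp_all

theorem mergeChk_eq_all (b : List Char) : ∀ (a : List Char),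
    a.Pairwise (· ≤ ·) → b.Pairwise (· ≤ ·) →
    mergeChk a b = b.all (fun c => decide (c ∈ a)) := by
  induction b with
  | nil => intro a _ _; rfl
  | cons c b ih =>
    intro a ha hb
    have hsplit : a.takeWhile (fun x => decide (x < c)) ++ a.dropWhile (fun x => decide (x < c)) = a :=
      List.takeWhile_append_dropWhile
    have htw : ∀ y ∈ a.takeWhile (fun x => decide (x < c)), y < c := by
      intro y hy
      simpa using List.mem_takeWhile_imp hy
    rw [List.all_cons]
    cases hdw : a.dropWhile (fun x => decide (x < c)) with
    | nil =>
      have hcn : c ∉ a := by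
        intro hmem
        have := (List.dropWhile_eq_nil_iff).mp hdw c hmem
        simp at this
      simp [mergeChk, hdw, hcn]
    | cons x xs =>
      have hxnlt : ¬ x < c := by
        have hne : a.dropWhile (fun x => decide (x < c)) ≠ [] := by simp [hdw]
        have := List.head_dropWhile_not (fun x => decide (x < c)) hne
        simpa [hdw] using this
      have hsub : (x :: xs).Sublist a := hdw ▸ List.dropWhile_sublist _
      have hxxs : (x :: xs).Pairwise (· ≤ ·) := ha.sublist hsub
      have hred : mergeChk a (c :: b) = if x = c then mergeChk (x :: xs) b else false := by
        simp only [mergeChk, hdw]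
      rw [hred]
      by_cases he : x = c
      · subst he
        have hcmem : x ∈ a := hsub.subset (by simp)
        rw [if_pos rfl]
        have hbp : b.Pairwise (· ≤ ·) := hb.sublist (List.sublist_cons_self _ _)
        have hge : ∀ y ∈ b, x ≤ y := fun y hy => (List.pairwise_cons.mp hb).1 y hy
        rw [ih _ hxxs hbp]
        have hall : (b.all fun c' => decide (c' ∈ x :: xs)) = b.all fun c' => decide (c' ∈ a) := by
          apply pv_all_congr
          intro y hy
          have hxy : x ≤ y := hge y hy
          have hiff : y ∈ x :: xs ↔ y ∈ a := by
            constructor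
            · exact fun h => hsub.subset h
            · intro hya
              rw [← hsplit] at hya
              rcases List.mem_append.mp hya with h1 | h1
              · exact absurd (htw y h1) (fun hlt => absurd (lt_of_le_of_lt hxy hlt) hxnlt)
              · exact hdw ▸ h1
          exact decide_eq_decide.mpr hiff
        rw [hall, decide_eq_true hcmem, Bool.true_and]
      · rw [if_neg he]
        have hcn : c ∉ a := by
          intro hmem
          rw [← hsplit] at hmem
          rcases List.mem_append.mp hmem with h1 | h1
          · exact lt_irrefl c (htw c h1)
          · rw [hdw] at h1
            rcases List.mem_cons.mp h1 with h2 | h2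
            · exact he h2.symm
            · have hxle : x ≤ c := (List.pairwise_cons.mp hxxs).1 c h2
              have hcx : c < x := lt_of_le_of_ne (le_of_not_gt hxnlt) (fun h => he h.symm)
              exact absurd hxle (not_le_of_gt hcx)
        simp [hcn]

-- ===== VERDICT (by name: the statement is the Claim_ definition above) =====
theorem StringContains_spec : Claim_equal_StringContains := by
  intro s1 s2 _
  unfold Spec_StringContains StringContains StringContains_alt
  by_cases hemp : s1.toList.isEmpty || s2.toList.isEmpty
  · simp [hemp]
  · rw [if_neg hemp, if_neg hemp]
    have hpa : (PySem.List.sorted s1.toList (fun x => x) false).Pairwise (· ≤ ·) := by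
      simpa using PySem.List.sorted_pairwise (xs := s1.toList) (key := fun x => x)
    have hpb : (PySem.List.sorted s2.toList (fun x => x) false).Pairwise (· ≤ ·) := by
      simpa using PySem.List.sorted_pairwise (xs := s2.toList) (key := fun x => x)
    rw [sc_loop_eq_mergeChk _ _ 0 (Nat.zero_le _), List.drop_zero,
      mergeChk_eq_all _ _ hpa hpb, sc_check_eq_all]
    rw [Bool.eq_iff_iff]
    simp only [List.all_eq_true, sc_fold_contains,
      PySem.Dict.contains_empty, PySem.List.mem_sorted, Bool.false_or,
      decide_eq_true_eq]
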